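-- pv_equiv track=rewrite | github.com/danonbrez/Holofractal_Harmonicode | hhs_backend/runtime/runtime_replay_topology.py | synchronize_partition_replay
-- ===== SOURCE A (Python) =====
-- from typing import (
--     Dict,
--     Any,
--     List,
--     Optional,
-- )
--
-- def synchronize_partition_replay(
--
--     partitions: Dict[str, List[str]],
-- ):
--
--     synchronized = True
--
--     lengths = [
--
--         len(x)
--
--         for x in partitions.values()
--     ]
--
--     if lengths:
--
--         synchronized = (
--             max(lengths)
--             - min(lengths)
--         ) <= 1
--
--     return synchronized
-- ===== SOURCE B (Python) =====
-- def synchronize_partition_replay(partitions):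
--     # Synchronized iff there are at most two distinct value-lengths and,
--     # when there are exactly two, they are consecutive integers.
--     distinct = {len(x) for x in partitions.values()}
--     if len(distinct) <= 1:
--         return True
--     if len(distinct) > 2:
--         return False
--     a, b = distinct
--     return abs(a - b) == 1
-- ===== Notes on version B (the rewrite author's own statement) =====
-- stated objective: alternative
-- what changed: Instead of building the list of lengths and comparing max() and min(), B builds the SET of distinct lengths and decides by its cardinality: <=1 distinct length is synchronized, >2 is not, and exactly two distinct lengths are synchronized iff they differ by 1 (correct because max-min<=1 over integers forces at most two distinct consecutive values).
import Mathlib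
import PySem

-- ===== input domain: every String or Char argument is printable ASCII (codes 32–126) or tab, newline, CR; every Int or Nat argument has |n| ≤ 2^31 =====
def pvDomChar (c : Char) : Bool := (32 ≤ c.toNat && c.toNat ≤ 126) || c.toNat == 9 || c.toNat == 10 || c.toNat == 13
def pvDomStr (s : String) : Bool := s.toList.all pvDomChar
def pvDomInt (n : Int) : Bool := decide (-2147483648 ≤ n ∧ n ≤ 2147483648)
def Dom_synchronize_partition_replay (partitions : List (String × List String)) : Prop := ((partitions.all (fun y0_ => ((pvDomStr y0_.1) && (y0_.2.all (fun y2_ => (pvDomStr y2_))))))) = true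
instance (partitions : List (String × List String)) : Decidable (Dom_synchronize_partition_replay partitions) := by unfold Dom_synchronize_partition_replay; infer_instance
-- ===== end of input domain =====

-- B replaces the build-lengths + max/min check by a distinct-lengths-set cardinality test (alternative algorithm, same cost).


-- ===== PORT A =====
-- Port of A: build the list of lengths, then max() and min() via PySem extrema.
def synchronize_partition_replay (partitions : List (String × List String)) : Bool :=
  let synchronized := true
  let lengths : List Int := partitions.map (fun x => (x.2.length : Int))
  if lengths.isEmpty then synchronized
  else
    match PySem.List.max? lengths (fun y => y), PySem.List.min? lengths (fun y => y) with
    | some mx, some mn => decide (mx - mn ≤ 1)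
    | _, _ => synchronized

-- ===== PORT B =====
-- Port of B: set of distinct lengths; decide by its cardinality.
-- (B consumes the two-element set only through |a-b|, which is independent of set order.)
def synchronize_partition_replay_alt (partitions : List (String × List String)) : Bool :=
  let distinct : PySem.Set Int := PySem.Set.ofList (partitions.map (fun x => (x.2.length : Int)))
  if distinct.length ≤ 1 then true
  else if 2 < distinct.length then false
  else
    match distinct with
    | [a, b] => decide ((a - b).natAbs = 1)
    | _ => true  -- unreachable: distinct has exactly two elements here

-- ===== PRECONDITION & SPEC =====
def Spec_synchronize_partition_replay (partitions : List (String × List String)) (out : Bool) : Prop := out = synchronize_partition_replay_alt partitions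
instance (partitions : List (String × List String)) (out : Bool) : Decidable (Spec_synchronize_partition_replay partitions out) := by unfold Spec_synchronize_partition_replay; infer_instance

-- ===== CLAIM (what is proved, stated in full; the proofs are below) =====
def Claim_equal_synchronize_partition_replay : Prop := ∀ (partitions : List (String × List String)), Dom_synchronize_partition_replay partitions → Spec_synchronize_partition_replay partitions (synchronize_partition_replay partitions)

-- ===== LEMMAS AND PROOFS =====
lemma pv_main (L : List Int) (h : L ≠ []) :
    (match PySem.List.max? L (fun y => y), PySem.List.min? L (fun y => y) with
      | some mx, some mn => decide (mx - mn ≤ 1)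
      | _, _ => true) =
    (let d := PySem.Set.ofList L
     if d.length ≤ 1 then true
     else if 2 < d.length then false
     else match d with
       | [a, b] => decide ((a - b).natAbs = 1)
       | _ => true) := by
  obtain ⟨n, ls, rfl⟩ := List.exists_cons_of_ne_nil h
  simp only [PySem.List.max?_id_cons, PySem.List.min?_id_cons]
  set mx := ls.foldl max n with hmx
  set mn := ls.foldl min n with hmn
  have hmx_mem : mx ∈ n :: ls := by
    rcases PySem.List.foldl_max_mem ls n with h' | h'
    · exact h' ▸ List.mem_cons_self
    · exact List.mem_cons_of_mem _ h'
  have hmn_mem : mn ∈ n :: ls := by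
    rcases PySem.List.foldl_min_mem ls n with h' | h'
    · exact h' ▸ List.mem_cons_self
    · exact List.mem_cons_of_mem _ h'
  have hmx_ub : ∀ y ∈ n :: ls, y ≤ mx := by
    intro y hy
    rcases List.mem_cons.mp hy with rfl | hy
    · exact (PySem.List.le_foldl_max ls y).1
    · exact (PySem.List.le_foldl_max ls n).2 y hy
  have hmn_lb : ∀ y ∈ n :: ls, mn ≤ y := by
    intro y hy
    rcases List.mem_cons.mp hy with rfl | hy
    · exact (PySem.List.foldl_min_le ls y).1
    · exact (PySem.List.foldl_min_le ls n).2 y hy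
  have hsmem : ∀ x, x ∈ PySem.Set.ofList (n :: ls) ↔ x ∈ n :: ls := fun x =>
    PySem.Set.mem_ofList _ _
  have hnodup : (PySem.Set.ofList (n :: ls)).Nodup := PySem.Set.nodup_ofList _
  have hnmem : n ∈ PySem.Set.ofList (n :: ls) := (hsmem n).mpr List.mem_cons_self
  match hS : PySem.Set.ofList (n :: ls) with
  | [] => rw [hS] at hnmem; cases hnmem
  | [a] =>
    rw [hS] at hsmem
    have hma : mx = a := by have := (hsmem mx).mpr hmx_mem; simpa using this
    have hna : mn = a := by have := (hsmem mn).mpr hmn_mem; simpa using this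
    simp [hma, hna]
  | [a, b] =>
    rw [hS] at hsmem hnodup
    have hab : a ≠ b := by simpa using hnodup
    have hma : mx = a ∨ mx = b := by have := (hsmem mx).mpr hmx_mem; simpa using this
    have hna : mn = a ∨ mn = b := by have := (hsmem mn).mpr hmn_mem; simpa using this
    have ha : a ∈ n :: ls := (hsmem a).mp (by simp)
    have hb : b ∈ n :: ls := (hsmem b).mp (by simp)
    have h1 := hmx_ub a ha
    have h2 := hmx_ub b hb
    have h3 := hmn_lb a ha
    have h4 := hmn_lb b hb
    simp only [List.length_cons, List.length_nil]
    norm_num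
    omega
  | a :: b :: c :: rest =>
    rw [hS] at hsmem hnodup
    have hab : a ≠ b := by
      intro h'; exact (List.nodup_cons.mp hnodup).1 (h' ▸ by simp)
    have hac : a ≠ c := by
      intro h'; exact (List.nodup_cons.mp hnodup).1 (h' ▸ by simp)
    have hbc : b ≠ c := by
      have := (List.nodup_cons.mp (List.nodup_cons.mp hnodup).2).1
      intro h'; exact this (h' ▸ by simp)
    have ha := hmx_ub a ((hsmem a).mp (by simp))
    have hb := hmx_ub b ((hsmem b).mp (by simp))
    have hc := hmx_ub c ((hsmem c).mp (by simp))
    have ha' := hmn_lb a ((hsmem a).mp (by simp))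
    have hb' := hmn_lb b ((hsmem b).mp (by simp))
    have hc' := hmn_lb c ((hsmem c).mp (by simp))
    simp only [List.length_cons]
    norm_num
    omega

-- ===== VERDICT (by name: the statement is the Claim_ definition above) =====
theorem synchronize_partition_replay_spec : Claim_equal_synchronize_partition_replay := by
  intro partitions _
  unfold Spec_synchronize_partition_replay synchronize_partition_replay synchronize_partition_replay_alt
  cases hp : partitions.map (fun x => (x.2.length : Int)) with
  | nil => simp
  | cons n ls =>
    have := pv_main (n :: ls) (by simp)
    simp only [List.isEmpty_cons, if_neg Bool.false_ne_true]
    simpa using this
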